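-- pv_equiv track=rewrite | github.com/lester1027/game_bot_linkup | linkage.py | count_turn
-- ===== SOURCE A (Python) =====
-- def count_turn(walk):
--     moving_coord=[]
--     #for each step in the walk, determine the direction of movement
--     for w in range(len(walk)-1):
--         coord1=walk[w]
--         coord2=walk[w+1]
--         if abs(coord1[0]-coord2[0])==1 and abs(coord1[1]-coord2[1])==0:
--             moving_coord.append('y')
--         elif abs(coord1[1]-coord2[1])==1 and abs(coord1[0]-coord2[0])==0:
--             moving_coord.append('x')
--
--     #count the number of turning times
--     turn_count=0
--     for m in range(len(moving_coord)-1):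
--         if moving_coord[m] != moving_coord[m+1]:
--             turn_count+=1
--
--     return turn_count
-- ===== SOURCE B (Python) =====
-- def count_turn(walk):
--     prev = None
--     turn_count = 0
--     for p, q in zip(walk, walk[1:]):
--         dx = p[0] - q[0]
--         dy = p[1] - q[1]
--         if abs(dx) == 1 and dy == 0:
--             d = 'y'
--         elif abs(dy) == 1 and dx == 0:
--             d = 'x'
--         else:
--             continue
--         if prev is not None and prev != d:
--             turn_count += 1
--         prev = d
--     return turn_count
-- ===== Notes on version B (the rewrite author's own statement) =====
-- stated objective: simpler
-- what changed: B makes a single pass over adjacent pairs carrying only the previous valid direction and a counter, instead of A's two passes that first materialise a direction list and then rescan it for changes.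
import Mathlib
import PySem

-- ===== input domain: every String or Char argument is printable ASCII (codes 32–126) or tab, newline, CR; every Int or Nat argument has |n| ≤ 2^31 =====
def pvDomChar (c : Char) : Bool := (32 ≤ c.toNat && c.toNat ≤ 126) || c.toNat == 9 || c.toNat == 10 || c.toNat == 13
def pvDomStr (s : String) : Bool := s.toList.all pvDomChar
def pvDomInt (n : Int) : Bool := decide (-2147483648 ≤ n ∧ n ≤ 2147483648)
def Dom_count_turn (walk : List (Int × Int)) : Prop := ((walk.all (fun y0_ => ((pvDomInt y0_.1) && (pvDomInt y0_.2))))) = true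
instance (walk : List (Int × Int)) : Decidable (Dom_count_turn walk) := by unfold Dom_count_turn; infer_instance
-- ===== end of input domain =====

-- B replaces A's two passes (build a direction list, then rescan it for changes) by one
-- pass over adjacent pairs carrying only the last valid direction and a counter (objective: simpler).


-- ===== PORT A =====
-- loop body of A's first loop: append the direction of the step coord1 -> coord2 (if any)
def pvAdir (acc : List Char) (coord1 coord2 : Int × Int) : List Char :=
  if (coord1.1 - coord2.1).natAbs = 1 ∧ (coord1.2 - coord2.2).natAbs = 0 then acc ++ ['y']
  else if (coord1.2 - coord2.2).natAbs = 1 ∧ (coord1.1 - coord2.1).natAbs = 0 then acc ++ ['x']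
  else acc

-- loop body of A's second loop: bump the count when adjacent directions differ
def pvAcmp (turn_count : Int) (x y : Char) : Int :=
  if x ≠ y then turn_count + 1 else turn_count

def count_turn (walk : List (Int × Int)) : Int :=
  -- for each step in the walk, determine the direction of movement
  let moving_coord : List Char :=
    (PySem.List.pyRange 0 ((walk.length : Int) - 1) 1).foldl
      (fun acc w => pvAdir acc (PySem.List.pyGetD walk w ((0 : Int), (0 : Int)))
                              (PySem.List.pyGetD walk (w + 1) ((0 : Int), (0 : Int)))) []
  -- count the number of turning times
  (PySem.List.pyRange 0 ((moving_coord.length : Int) - 1) 1).foldl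
    (fun turn_count m => pvAcmp turn_count (PySem.List.pyGetD moving_coord m ' ')
                                           (PySem.List.pyGetD moving_coord (m + 1) ' ')) 0

-- ===== PORT B =====
-- loop body of B: skip invalid steps, else count a turn and remember the direction
def pvBstep (st : Option Char × Int) (pq : (Int × Int) × (Int × Int)) : Option Char × Int :=
  let dx : Int := pq.1.1 - pq.2.1
  let dy : Int := pq.1.2 - pq.2.2
  let d : Option Char :=
    if dx.natAbs = 1 ∧ dy = 0 then some 'y'
    else if dy.natAbs = 1 ∧ dx = 0 then some 'x'
    else none
  match d with
  | none => st      -- continue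
  | some c => (some c, if st.1 ≠ none ∧ st.1 ≠ some c then st.2 + 1 else st.2)

def count_turn_alt (walk : List (Int × Int)) : Int :=
  ((walk.zip (PySem.List.slice walk (some 1) none)).foldl pvBstep (none, 0)).2

-- ===== PRECONDITION & SPEC =====
def Spec_count_turn (walk : List (Int × Int)) (out : Int) : Prop := out = count_turn_alt walk
instance (walk : List (Int × Int)) (out : Int) : Decidable (Spec_count_turn walk out) := by unfold Spec_count_turn; infer_instance

-- ===== CLAIM (what is proved, stated in full; the proofs are below) =====
def Claim_equal_count_turn : Prop := ∀ (walk : List (Int × Int)), Dom_count_turn walk → Spec_count_turn walk (count_turn walk)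

-- ===== LEMMAS AND PROOFS =====

-- number of adjacent unequal pairs in a list of chars
def pvCountAdj : List Char → Int
  | a :: b :: t => (if a ≠ b then 1 else 0) + pvCountAdj (b :: t)
  | _ => 0

theorem pvCountAdj_nil : pvCountAdj [] = 0 := rfl
theorem pvCountAdj_single (a : Char) : pvCountAdj [a] = 0 := rfl
theorem pvCountAdj_cons_cons (a b : Char) (t : List Char) :
    pvCountAdj (a :: b :: t) = (if a ≠ b then 1 else 0) + pvCountAdj (b :: t) := rfl

-- an index loop over positions w, w+1 is the fold over adjacent pairs (Nat-index form)
theorem pv_aux_fold {α β : Type} (d : α) (f : β → α → α → β) :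
    ∀ (l : List α) (init : β),
      (List.range (l.length - 1)).foldl
        (fun acc k => f acc (l.getD k d) (l.getD (k + 1) d)) init
      = (l.zip (l.drop 1)).foldl (fun acc p => f acc p.1 p.2) init := by
  intro l
  induction l with
  | nil => intro init; simp
  | cons a t ih =>
    intro init
    cases t with
    | nil => simp
    | cons b t' =>
      have hlen : (a :: b :: t').length - 1 = ((b :: t').length - 1) + 1 := by simp
      rw [hlen, List.range_succ_eq_map, List.foldl_cons, List.foldl_map]
      simp only [List.getD_cons_zero, List.getD_cons_succ]
      have ih' := ih (f init a b)
      simp only [List.getD_cons_succ] at ih'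
      rw [ih']
      simp [List.zip]

-- A's pyRange/pyGetD loops in the Nat-index form of pv_aux_fold
theorem pv_pyloop {α β : Type} (d : α) (f : β → α → α → β) (l : List α) (init : β) :
    (PySem.List.pyRange 0 ((l.length : Int) - 1) 1).foldl
      (fun acc w => f acc (PySem.List.pyGetD l w d) (PySem.List.pyGetD l (w + 1) d)) init
    = (l.zip (l.drop 1)).foldl (fun acc p => f acc p.1 p.2) init := by
  rw [PySem.List.pyRange_one, List.foldl_map]
  have h1 : ((l.length : Int) - 1 - 0).toNat = l.length - 1 := by omega
  rw [h1, ← pv_aux_fold d f l init]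
  apply PySem.List.foldl_congr_mem
  intro acc k _
  have h0 : (0 : Int) + (k : Int) = ((k : Nat) : Int) := by ring
  have h2 : ((k : Nat) : Int) + 1 = (((k + 1 : Nat)) : Int) := by push_cast; ring
  rw [h0, h2, PySem.List.pyGetD_natCast, PySem.List.pyGetD_natCast]

-- appending one direction: adjacent-change count grows by 1 iff the last direction differs
theorem pv_countAdj_concat (cs : List Char) (c : Char) :
    pvCountAdj (cs ++ [c])
      = pvCountAdj cs + (if cs.getLast? ≠ none ∧ cs.getLast? ≠ some c then 1 else 0) := by
  induction cs with
  | nil => simp [pvCountAdj_nil, pvCountAdj_single]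
  | cons a t ih =>
    cases t with
    | nil =>
      simp only [List.cons_append, List.nil_append, pvCountAdj_cons_cons, pvCountAdj_single, List.getLast?_singleton]
      split_ifs <;> simp_all
    | cons b t' =>
      simp only [List.cons_append] at ih ⊢
      rw [pvCountAdj_cons_cons a b (t' ++ [c]), ih, List.getLast?_cons_cons,
        pvCountAdj_cons_cons a b t']
      ring

-- A's second loop (as pair fold) computes pvCountAdj
theorem pv_count_fold (cs : List Char) :
    ∀ (t : Int),
      (cs.zip (cs.drop 1)).foldl (fun acc p => pvAcmp acc p.1 p.2) t = t + pvCountAdj cs := by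
  induction cs with
  | nil => intro t; simp [pvCountAdj_nil]
  | cons a l ih =>
    intro t
    cases l with
    | nil => simp [pvCountAdj_single]
    | cons b t' =>
      simp only [List.drop_succ_cons, List.drop_zero, List.zip_cons_cons, List.foldl_cons]
      simp only [List.drop_succ_cons, List.drop_zero] at ih
      rw [ih, pvCountAdj_cons_cons, pvAcmp]
      split_ifs <;> ring

-- B's stateful fold tracks (last direction, change count) of A's direction list
theorem pv_core :
    ∀ (P : List ((Int × Int) × (Int × Int))) (cs : List Char),
      P.foldl pvBstep (cs.getLast?, pvCountAdj cs)
        = ((P.foldl (fun acc p => pvAdir acc p.1 p.2) cs).getLast?,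
           pvCountAdj (P.foldl (fun acc p => pvAdir acc p.1 p.2) cs)) := by
  intro P
  induction P with
  | nil => intro cs; simp
  | cons p Q ih =>
    intro cs
    simp only [List.foldl_cons]
    have hstep : pvBstep (cs.getLast?, pvCountAdj cs) p
        = ((pvAdir cs p.1 p.2).getLast?, pvCountAdj (pvAdir cs p.1 p.2)) := by
      by_cases h1 : (p.1.1 - p.2.1).natAbs = 1 ∧ (p.1.2 - p.2.2).natAbs = 0
      · have hy : p.1.2 - p.2.2 = 0 := by omega
        simp [pvBstep, pvAdir, h1, hy, pv_countAdj_concat]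
        split_ifs <;> ring
      · by_cases h2 : (p.1.2 - p.2.2).natAbs = 1 ∧ (p.1.1 - p.2.1).natAbs = 0
        · have hx : p.1.1 - p.2.1 = 0 := by omega
          have hy : ¬ (p.1.2 - p.2.2 = 0) := by omega
          simp [pvBstep, pvAdir, h2, hx, hy, pv_countAdj_concat]
          split_ifs <;> ring
        · have hy : ¬ ((p.1.1 - p.2.1).natAbs = 1 ∧ p.1.2 - p.2.2 = 0) := by
            intro hc; exact h1 ⟨hc.1, by omega⟩
          have hx : ¬ ((p.1.2 - p.2.2).natAbs = 1 ∧ p.1.1 - p.2.1 = 0) := by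
            intro hc; exact h2 ⟨hc.1, by omega⟩
          simp [pvBstep, pvAdir, hy, hx]
    rw [hstep, ih]

-- ===== VERDICT (by name: the statement is the Claim_ definition above) =====
theorem count_turn_spec : Claim_equal_count_turn := by
  intro walk _
  unfold Spec_count_turn
  simp only [count_turn, count_turn_alt, PySem.List.slice_from_one, ← List.drop_one]
  rw [pv_pyloop ((0 : Int), (0 : Int)) pvAdir walk [], pv_pyloop ' ' pvAcmp, pv_count_fold]
  have h0 : ((none : Option Char), (0 : Int)) = ((([] : List Char)).getLast?, pvCountAdj []) := by
    simp [pvCountAdj_nil]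
  rw [h0, pv_core]
  omega
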